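-- pv_equiv track=rewrite | github.com/crakerjac/freezerPi | display_service.py | evaluate_worst_state
-- ===== SOURCE A (Python) =====
-- def evaluate_worst_state(sensor_data, is_stale, temp_warning, temp_critical, critical_counts):
--     """Returns the worst-case display state across all sensors."""
--     if is_stale:
--         return "CRITICAL"
--
--     worst_state = "NORMAL"
--
--     for name, temp in sensor_data.items():
--         if temp is None:
--             return "CRITICAL"
--         elif temp >= temp_critical and critical_counts.get(name, 0) >= 2:
--             return "CRITICAL"
--         elif temp >= temp_warning:
--             if worst_state == "NORMAL":
--                 worst_state = "WARNING"
--
--     return worst_state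
-- ===== SOURCE B (Python) =====
-- def evaluate_worst_state(sensor_data, is_stale, temp_warning, temp_critical, critical_counts):
--     """Returns the worst-case display state across all sensors."""
--     if is_stale:
--         return "CRITICAL"
--     if any(t is None or (t >= temp_critical and critical_counts.get(n, 0) >= 2)
--            for n, t in sensor_data.items()):
--         return "CRITICAL"
--     if any(t >= temp_warning for t in sensor_data.values()):
--         return "WARNING"
--     return "NORMAL"
-- ===== Notes on version B (the rewrite author's own statement) =====
-- stated objective: simpler
-- what changed: Replaces the single short-circuiting loop with a worst_state accumulator by two staged any() predicate scans (critical scan including None, then warning scan), which is valid because the result is the maximum severity over sensors.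
import Mathlib
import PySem

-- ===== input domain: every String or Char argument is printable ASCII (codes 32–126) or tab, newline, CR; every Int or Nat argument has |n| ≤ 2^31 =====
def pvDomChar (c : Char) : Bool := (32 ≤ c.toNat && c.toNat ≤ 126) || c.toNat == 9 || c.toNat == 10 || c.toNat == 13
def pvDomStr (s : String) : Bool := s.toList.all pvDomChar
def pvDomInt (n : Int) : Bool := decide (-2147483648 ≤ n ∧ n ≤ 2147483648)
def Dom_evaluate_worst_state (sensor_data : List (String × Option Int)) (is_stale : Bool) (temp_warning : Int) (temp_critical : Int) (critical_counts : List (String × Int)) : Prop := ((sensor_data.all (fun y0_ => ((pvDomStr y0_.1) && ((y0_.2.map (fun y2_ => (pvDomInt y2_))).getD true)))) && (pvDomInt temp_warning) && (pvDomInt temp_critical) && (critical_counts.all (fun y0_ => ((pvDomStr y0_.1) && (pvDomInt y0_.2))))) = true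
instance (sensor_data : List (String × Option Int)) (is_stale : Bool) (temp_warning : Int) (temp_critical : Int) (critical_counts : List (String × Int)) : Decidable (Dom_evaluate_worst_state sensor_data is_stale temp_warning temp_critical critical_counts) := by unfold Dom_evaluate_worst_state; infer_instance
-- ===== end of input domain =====

-- B replaces A's single short-circuiting loop (with a worst_state accumulator) by two
-- staged any-scans: a critical scan, then a warning scan; objective: simpler.

-- ===== PORT A =====
-- the for-loop with early returns and the worst_state accumulator
def pvLoopA (temp_warning : Int) (temp_critical : Int) (critical_counts : PySem.Dict String Int) : List (String × Option Int) → String → String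
  | [], worst_state => worst_state
  | (name, temp) :: rest, worst_state =>
    match temp with
    | none => "CRITICAL"
    | some t =>
      if t ≥ temp_critical ∧ PySem.Dict.getD critical_counts name (0:Int) ≥ 2 then "CRITICAL"
      else if t ≥ temp_warning then
        pvLoopA temp_warning temp_critical critical_counts rest
          (if worst_state = "NORMAL" then "WARNING" else worst_state)
      else pvLoopA temp_warning temp_critical critical_counts rest worst_state

def evaluate_worst_state (sensor_data : List (String × Option Int)) (is_stale : Bool) (temp_warning : Int) (temp_critical : Int) (critical_counts : List (String × Int)) : String :=
  if is_stale then "CRITICAL"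
  else pvLoopA temp_warning temp_critical (PySem.Dict.ofList critical_counts)
    (PySem.Dict.items (PySem.Dict.ofList sensor_data)) "NORMAL"

-- ===== PORT B =====
def evaluate_worst_state_alt (sensor_data : List (String × Option Int)) (is_stale : Bool) (temp_warning : Int) (temp_critical : Int) (critical_counts : List (String × Int)) : String :=
  if is_stale then "CRITICAL"
  else if (PySem.Dict.items (PySem.Dict.ofList sensor_data)).any (fun p =>
      match p.2 with
      | none => true
      | some t => decide (t ≥ temp_critical) && decide (PySem.Dict.getD (PySem.Dict.ofList critical_counts) p.1 (0:Int) ≥ 2)) then "CRITICAL"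
  else if (PySem.Dict.items (PySem.Dict.ofList sensor_data)).any (fun p =>
      match p.2 with
      | none => false   -- unreachable: the critical scan already caught every None
      | some t => decide (t ≥ temp_warning)) then "WARNING"
  else "NORMAL"

-- ===== PRECONDITION & SPEC =====
def Spec_evaluate_worst_state (sensor_data : List (String × Option Int)) (is_stale : Bool) (temp_warning : Int) (temp_critical : Int) (critical_counts : List (String × Int)) (out : String) : Prop := out = evaluate_worst_state_alt sensor_data is_stale temp_warning temp_critical critical_counts
instance (sensor_data : List (String × Option Int)) (is_stale : Bool) (temp_warning : Int) (temp_critical : Int) (critical_counts : List (String × Int)) (out : String) : Decidable (Spec_evaluate_worst_state sensor_data is_stale temp_warning temp_critical critical_counts out) := by unfold Spec_evaluate_worst_state; infer_instance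

-- ===== CLAIM (what is proved, stated in full; the proofs are below) =====
def Claim_equal_evaluate_worst_state : Prop := ∀ (sensor_data : List (String × Option Int)) (is_stale : Bool) (temp_warning : Int) (temp_critical : Int) (critical_counts : List (String × Int)), Dom_evaluate_worst_state sensor_data is_stale temp_warning temp_critical critical_counts → Spec_evaluate_worst_state sensor_data is_stale temp_warning temp_critical critical_counts (evaluate_worst_state sensor_data is_stale temp_warning temp_critical critical_counts)

-- ===== LEMMAS AND PROOFS =====

-- when the accumulator is already "WARNING", the loop returns CRITICAL iff the critical scan fires
theorem pvLoopA_warning (tw tc : Int) (cc : PySem.Dict String Int) (l : List (String × Option Int)) :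
    pvLoopA tw tc cc l "WARNING" =
      if l.any (fun p =>
        match p.2 with
        | none => true
        | some t => decide (t ≥ tc) && decide (PySem.Dict.getD cc p.1 (0:Int) ≥ 2)) then "CRITICAL"
      else "WARNING" := by
  induction l with
  | nil => simp [pvLoopA]
  | cons hd tl ih =>
    obtain ⟨name, temp⟩ := hd
    cases temp with
    | none => simp [pvLoopA, List.any_cons]
    | some t =>
      rw [List.any_cons]
      by_cases hc : t ≥ tc ∧ PySem.Dict.getD cc name (0:Int) ≥ 2
      · simp [pvLoopA, hc.1, hc.2]
      · have hb : (decide (t ≥ tc) && decide (PySem.Dict.getD cc name (0:Int) ≥ 2)) = false := by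
          simp only [Bool.and_eq_false_iff, decide_eq_false_iff_not]; tauto
        simp only [pvLoopA, if_neg hc, hb, Bool.false_or, ite_self]
        exact ih

-- from the initial accumulator "NORMAL", the loop equals B's two staged scans
theorem pvLoopA_normal (tw tc : Int) (cc : PySem.Dict String Int) (l : List (String × Option Int)) :
    pvLoopA tw tc cc l "NORMAL" =
      if l.any (fun p =>
        match p.2 with
        | none => true
        | some t => decide (t ≥ tc) && decide (PySem.Dict.getD cc p.1 (0:Int) ≥ 2)) then "CRITICAL"
      else if l.any (fun p =>
        match p.2 with
        | none => false
        | some t => decide (t ≥ tw)) then "WARNING"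
      else "NORMAL" := by
  induction l with
  | nil => simp [pvLoopA]
  | cons hd tl ih =>
    obtain ⟨name, temp⟩ := hd
    cases temp with
    | none => simp [pvLoopA, List.any_cons]
    | some t =>
      rw [List.any_cons, List.any_cons]
      by_cases hc : t ≥ tc ∧ PySem.Dict.getD cc name (0:Int) ≥ 2
      · simp [pvLoopA, hc.1, hc.2]
      · have hb : (decide (t ≥ tc) && decide (PySem.Dict.getD cc name (0:Int) ≥ 2)) = false := by
          simp only [Bool.and_eq_false_iff, decide_eq_false_iff_not]; tauto
        simp only [pvLoopA, if_neg hc, hb, Bool.false_or]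
        by_cases hw : t ≥ tw
        · rw [if_pos hw, if_pos trivial, pvLoopA_warning tw tc cc tl]
          simp [hw]
        · have hw' : decide (t ≥ tw) = false := by simp [hw]
          simp only [if_neg hw, ih, hw', Bool.false_or]

-- ===== VERDICT (by name: the statement is the Claim_ definition above) =====
theorem evaluate_worst_state_spec : Claim_equal_evaluate_worst_state := by
  intro sd st tw tc cc _
  unfold Spec_evaluate_worst_state evaluate_worst_state evaluate_worst_state_alt
  cases st
  · simp only [pvLoopA_normal]
  · simp
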